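-- pv_equiv track=rewrite | github.com/slam3085/adventofcode_2023 | 14/14.py | tilt_west
-- ===== SOURCE A (Python) =====
-- def tilt_west(field):
-- 	tilted = []
-- 	for line in field:
-- 		res = []
-- 		i = 0
-- 		while i < len(line):
-- 			if line[i] == '#':
-- 				res.append('#')
-- 				i += 1
-- 			else:
-- 				n_rocks = 0
-- 				n_empty = 0
-- 				while i < len(line) and line[i] != '#':
-- 					if line[i] == '.':
-- 						n_empty += 1
-- 					elif line[i] == 'O':
-- 						n_rocks += 1
-- 					i += 1
-- 				res += ['O'] * n_rocks + ['.'] * n_empty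
-- 		tilted.append(res)
-- 	return tilted
-- ===== SOURCE B (Python) =====
-- def tilt_west(field):
--     tilted = []
--     for line in field:
--         # partition the line into '#'-delimited segments (elements, not chars)
--         parts = []
--         seg = []
--         for c in line:
--             if c == '#':
--                 parts.append(seg)
--                 seg = []
--             else:
--                 seg.append(c)
--         parts.append(seg)
--         # rebuild each segment as O's then .'s (other elements are dropped)
--         res = []
--         for j, s in enumerate(parts):
--             if j:
--                 res.append('#')
--             res += ['O'] * s.count('O') + ['.'] * s.count('.')
--         tilted.append(res)
--     return tilted
-- ===== Notes on version B (the rewrite author's own statement) =====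
-- stated objective: simpler
-- what changed: A moves rocks with one interleaved index-based while-scan counting on the fly; B first partitions each line into '#'-delimited segments and then rebuilds each segment from its O/. counts, rejoining with '#'.
import Mathlib
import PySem

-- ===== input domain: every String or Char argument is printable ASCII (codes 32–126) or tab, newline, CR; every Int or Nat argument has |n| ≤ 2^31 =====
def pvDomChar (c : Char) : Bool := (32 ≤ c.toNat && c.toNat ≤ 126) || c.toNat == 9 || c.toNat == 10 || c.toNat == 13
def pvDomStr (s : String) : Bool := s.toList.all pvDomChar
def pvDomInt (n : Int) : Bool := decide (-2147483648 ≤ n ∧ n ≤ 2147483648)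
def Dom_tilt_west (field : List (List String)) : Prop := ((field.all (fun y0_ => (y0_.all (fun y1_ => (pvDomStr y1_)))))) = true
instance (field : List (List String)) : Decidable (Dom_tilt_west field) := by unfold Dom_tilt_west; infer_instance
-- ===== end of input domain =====

-- B is a simpler decomposition: partition each line into '#'-delimited segments, rebuild each
-- segment from its O/. counts, rejoin with '#'; same return value as A on all inputs (A is total).

-- ===== PORT A =====
-- the inner while loop of A: consume elements until '#', counting 'O' and '.'
def tiltScanA : List String → Nat → Nat → Nat × Nat × List String
  | [], nr, ne => (nr, ne, [])
  | c :: rest, nr, ne =>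
    if c = "#" then (nr, ne, c :: rest)
    else tiltScanA rest (if c = "O" then nr + 1 else nr) (if c = "." then ne + 1 else ne)

theorem tiltScanA_len : ∀ (l : List String) (nr ne : Nat), (tiltScanA l nr ne).2.2.length ≤ l.length
  | [], _, _ => Nat.le_refl _
  | c :: rest, nr, ne => by
    simp only [tiltScanA]
    split
    · simp
    · exact Nat.le_succ_of_le (tiltScanA_len rest _ _)

-- the outer while loop of A over one line
def tiltLineA : List String → List String
  | [] => []
  | c :: rest =>
    if h : c = "#" then "#" :: tiltLineA rest
    else
      match hs : tiltScanA (c :: rest) 0 0 with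
      | (nr, ne, rest') => List.replicate nr "O" ++ List.replicate ne "." ++ tiltLineA rest'
termination_by l => l.length
decreasing_by
  · simp
  · have hle : (tiltScanA (c :: rest) 0 0).2.2.length ≤ rest.length := by
      rw [show tiltScanA (c :: rest) 0 0
            = tiltScanA rest (if c = "O" then 0 + 1 else 0) (if c = "." then 0 + 1 else 0) from by
          simp [tiltScanA, h]]
      exact tiltScanA_len rest _ _
    rw [hs] at hle
    simpa using Nat.lt_succ_of_le hle

def tilt_west (field : List (List String)) : List (List String) :=
  field.map tiltLineA

-- ===== PORT B =====
-- B's first loop: partition the line into '#'-delimited segments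
def splitPartsB : List String → List (List String)
  | [] => [[]]
  | c :: rest =>
    if c = "#" then [] :: splitPartsB rest
    else
      match splitPartsB rest with
      | [] => [[c]]
      | p :: ps => (c :: p) :: ps

-- B's rebuilt segment: O's then .'s (other elements dropped)
def segOutB (s : List String) : List String :=
  List.replicate (PySem.List.count s "O") "O" ++ List.replicate (PySem.List.count s ".") "."

-- B's second loop: '#' before every segment except the first
def tiltLineB (line : List String) : List String :=
  match splitPartsB line with
  | [] => []
  | p :: ps => segOutB p ++ ps.flatMap (fun s => "#" :: segOutB s)

def tilt_west_alt (field : List (List String)) : List (List String) :=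
  field.map tiltLineB

-- ===== PRECONDITION & SPEC =====
def Spec_tilt_west (field : List (List String)) (out : List (List String)) : Prop := out = tilt_west_alt field
instance (field : List (List String)) (out : List (List String)) : Decidable (Spec_tilt_west field out) := by unfold Spec_tilt_west; infer_instance

-- ===== CLAIM (what is proved, stated in full; the proofs are below) =====
def Claim_equal_tilt_west : Prop := ∀ (field : List (List String)), Dom_tilt_west field → Spec_tilt_west field (tilt_west field)

-- ===== LEMMAS AND PROOFS =====

theorem tiltScanA_spec : ∀ (l : List String) (nr ne : Nat),
    tiltScanA l nr ne =
      (nr + (l.takeWhile (· != "#")).count "O",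
       ne + (l.takeWhile (· != "#")).count ".",
       l.dropWhile (· != "#"))
  | [], nr, ne => by simp [tiltScanA]
  | c :: rest, nr, ne => by
    by_cases h : c = "#"
    · simp [tiltScanA, h, List.takeWhile, List.dropWhile]
    · rw [show tiltScanA (c :: rest) nr ne
            = tiltScanA rest (if c = "O" then nr + 1 else nr) (if c = "." then ne + 1 else ne) by
          simp [tiltScanA, h]]
      rw [tiltScanA_spec rest _ _]
      simp only [List.takeWhile, List.dropWhile, show (c != "#") = true by simp [h],
        List.count_cons, Prod.mk.injEq]
      refine ⟨?_, ?_, trivial⟩ <;> split_ifs <;> simp_all <;> omega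

theorem dropWhileHeadFalse {α : Type} (p : α → Bool) :
    ∀ (l : List α) (d : α) (r : List α), l.dropWhile p = d :: r → p d = false
  | [], _, _ => by simp
  | a :: t, d, r => by
    by_cases hpa : p a = true
    · rw [List.dropWhile_cons_of_pos hpa]
      exact dropWhileHeadFalse p t d r
    · rw [List.dropWhile_cons_of_neg hpa]
      intro hEq
      cases hEq
      simpa using hpa

theorem splitPartsB_ne_nil (l : List String) : splitPartsB l ≠ [] := by
  cases l with
  | nil => simp [splitPartsB]
  | cons c rest =>
    simp only [splitPartsB]
    split
    · simp
    · split <;> simp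

theorem splitPartsB_spec (l : List String) :
    splitPartsB l = (l.takeWhile (· != "#")) ::
      (match l.dropWhile (· != "#") with
       | [] => []
       | _ :: r => splitPartsB r) := by
  induction l with
  | nil => simp [splitPartsB]
  | cons c rest ih =>
    by_cases h : c = "#"
    · simp [splitPartsB, h, List.takeWhile, List.dropWhile]
    · have hp : (c != "#") = true := by simp [h]
      simp only [splitPartsB, if_neg h, List.takeWhile, List.dropWhile, hp, ih]

theorem segOutB_eq (s : List String) :
    segOutB s = List.replicate (s.count "O") "O" ++ List.replicate (s.count ".") "." := by
  simp [segOutB, PySem.List.count]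

theorem tiltLineB_hash (r : List String) :
    tiltLineB ("#" :: r) = "#" :: tiltLineB r := by
  have h := splitPartsB_ne_nil r
  simp only [tiltLineB, splitPartsB]
  cases hr : splitPartsB r with
  | nil => exact absurd hr h
  | cons p ps => simp [segOutB, PySem.List.count]

theorem tiltLine_eq (l : List String) : tiltLineA l = tiltLineB l := by
  fun_induction tiltLineA l with
  | case1 => simp [tiltLineB, splitPartsB, segOutB, PySem.List.count]
  | case2 rest ih =>
    rw [tiltLineB_hash, ih]
  | case3 c rest h nr ne rest' hs ih =>
    rw [tiltScanA_spec] at hs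
    have hp : (c != "#") = true := by simp [h]
    have htw : (c :: rest).takeWhile (· != "#") = c :: rest.takeWhile (· != "#") := by
      simp [List.takeWhile, hp]
    have hnr : nr = ((c :: rest).takeWhile (· != "#")).count "O" := by
      have := congrArg Prod.fst hs; simpa using this.symm
    have hne : ne = ((c :: rest).takeWhile (· != "#")).count "." := by
      have := congrArg (fun t => t.2.1) hs; simpa using this.symm
    have hrest : rest' = (c :: rest).dropWhile (· != "#") := by
      have := congrArg (fun t => t.2.2) hs; simpa using this.symm
    rw [ih]
    conv_rhs => rw [tiltLineB, splitPartsB_spec (c :: rest)]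
    rw [← hrest, hnr, hne, ← segOutB_eq]
    cases hr : rest' with
    | nil => simp [tiltLineB, splitPartsB, segOutB, PySem.List.count]
    | cons d r =>
      have hne' : (c :: rest).dropWhile (· != "#") = d :: r := by rw [← hrest, hr]
      have hd : d = "#" := by
        have := dropWhileHeadFalse _ _ _ _ hne'
        simpa using this
      subst hd
      rw [tiltLineB_hash]
      have h2 := splitPartsB_ne_nil r
      cases hr2 : splitPartsB r with
      | nil => exact absurd hr2 h2
      | cons p ps =>
        simp [tiltLineB, hr2, segOutB, PySem.List.count]

-- ===== VERDICT (by name: the statement is the Claim_ definition above) =====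
theorem tilt_west_spec : Claim_equal_tilt_west := by
  intro field _
  unfold Spec_tilt_west tilt_west tilt_west_alt
  exact List.map_congr_left (fun l _ => tiltLine_eq l)
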